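-- pv_equiv track=rewrite | github.com/Yoonyesol/CodingTest | [프로그래머스] 완전탐색_모의고사.py | solution
-- ===== SOURCE A (Python) =====
-- def solution(answers):
--     answer = []
--     s1 = [1, 2, 3, 4, 5]
--     s2 = [2, 1, 2, 3, 2, 4, 2, 5]
--     s3 = [3, 3, 1, 1, 2, 2, 4, 4, 5, 5]
--     scores = [0,0,0]
--     max_score = 0
--     for i in range(len(answers)):
--         if(s1[i%5] == answers[i]): scores[0] = scores[0] + 1
--         if(s2[i%8] == answers[i]): scores[1] = scores[1] + 1
--         if(s3[i%10] == answers[i]): scores[2] = scores[2] + 1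
--     max_score = max(scores)
--     for i in range(len(scores)):
--         if (scores[i] == max_score):
--             answer.append(i+1)
--     return answer
-- ===== SOURCE B (Python) =====
-- def solution(answers):
--     counts = {}
--     for i, a in enumerate(answers):
--         key = (i % 40, a)
--         counts[key] = counts.get(key, 0) + 1
--     patterns = [[1, 2, 3, 4, 5],
--                 [2, 1, 2, 3, 2, 4, 2, 5],
--                 [3, 3, 1, 1, 2, 2, 4, 4, 5, 5]]
--     scores = [sum(counts.get((j, p[j % len(p)]), 0) for j in range(40))
--               for p in patterns]
--     best = max(scores)
--     return [k + 1 for k, s in enumerate(scores) if s == best]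
-- ===== Notes on version B (the rewrite author's own statement) =====
-- stated objective: alternative
-- what changed: B builds a histogram dictionary keyed by (index mod 40, answer) in one pass (40 = lcm of the three pattern periods) and then scores each pattern with 40 dictionary lookups, instead of A's fused loop that compares every answer against all three cyclic patterns and then a second index loop over the score list.
import Mathlib
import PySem

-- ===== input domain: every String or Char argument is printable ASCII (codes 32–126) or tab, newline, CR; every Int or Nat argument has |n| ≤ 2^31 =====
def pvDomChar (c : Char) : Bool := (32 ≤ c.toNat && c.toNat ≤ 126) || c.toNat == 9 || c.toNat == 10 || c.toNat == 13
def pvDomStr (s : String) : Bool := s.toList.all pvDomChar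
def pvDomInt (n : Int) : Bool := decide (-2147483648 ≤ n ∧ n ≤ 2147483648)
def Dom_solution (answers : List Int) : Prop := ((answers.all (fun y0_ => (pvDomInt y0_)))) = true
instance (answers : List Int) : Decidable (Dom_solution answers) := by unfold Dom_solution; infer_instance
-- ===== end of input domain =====

-- B replaces A's fused per-answer loop (comparing each answer against all three cyclic
-- patterns) by a histogram keyed by (index mod 40, answer) built in one pass — 40 = lcm of
-- the pattern periods — scored with 40 dictionary lookups per pattern (objective: alternative).


-- ===== PORT A =====
-- literal port of A: one fused loop over i ∈ range(len(answers)) updating the three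
-- score slots, then max(scores), then a second index loop collecting i+1 for maximal slots.
-- the mutable list scores[0..2] is carried as a triple; answers[i] / s[i%m] are in range,
-- ported with pyGetD (exact there); max(scores) on the nonempty literal list via max? (exact).
def solution (answers : List Int) : List Int :=
  let s1 : List Int := [1, 2, 3, 4, 5]
  let s2 : List Int := [2, 1, 2, 3, 2, 4, 2, 5]
  let s3 : List Int := [3, 3, 1, 1, 2, 2, 4, 4, 5, 5]
  let scores : Int × Int × Int :=
    (PySem.List.pyRange 0 (answers.length : Int) 1).foldl
      (fun sc i =>
        let c0 := if PySem.List.pyGetD s1 (PySem.Int.mod i 5) 0 = PySem.List.pyGetD answers i 0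
                  then sc.1 + 1 else sc.1
        let c1 := if PySem.List.pyGetD s2 (PySem.Int.mod i 8) 0 = PySem.List.pyGetD answers i 0
                  then sc.2.1 + 1 else sc.2.1
        let c2 := if PySem.List.pyGetD s3 (PySem.Int.mod i 10) 0 = PySem.List.pyGetD answers i 0
                  then sc.2.2 + 1 else sc.2.2
        (c0, c1, c2)) (0, 0, 0)
  let scoresL : List Int := [scores.1, scores.2.1, scores.2.2]
  let max_score : Int := ((PySem.List.max? scoresL (fun y => y)).getD 0)
  (PySem.List.pyRange 0 (scoresL.length : Int) 1).foldl
    (fun answer i =>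
      if PySem.List.pyGetD scoresL i 0 = max_score then answer ++ [i + 1] else answer) []

-- ===== PORT B =====
-- counts[(i % 40, a)] += 1 in one pass over enumerate(answers) (dict.get default 0),
-- then each pattern's score is sum(counts.get((j, p[j % len(p)]), 0) for j in range(40)).
def solution_alt (answers : List Int) : List Int :=
  let counts : PySem.Dict (Int × Int) Int :=
    (PySem.List.enumerate answers 0).foldl
      (fun d ia =>
        let key : Int × Int := (PySem.Int.mod ia.1 40, ia.2)
        d.insert key (d.getD key 0 + 1)) PySem.Dict.empty
  let patterns : List (List Int) :=
    [[1, 2, 3, 4, 5], [2, 1, 2, 3, 2, 4, 2, 5], [3, 3, 1, 1, 2, 2, 4, 4, 5, 5]]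
  let scores : List Int := patterns.map (fun p =>
    ((PySem.List.pyRange 0 40 1).map
      (fun j => counts.getD (j, PySem.List.pyGetD p (PySem.Int.mod j (p.length : Int)) 0) 0)).sum)
  let best : Int := ((PySem.List.max? scores (fun y => y)).getD 0)
  ((PySem.List.enumerate scores 0).filter (fun ks => ks.2 = best)).map (fun ks => ks.1 + 1)

-- ===== PRECONDITION & SPEC =====
def Spec_solution (answers : List Int) (out : List Int) : Prop := out = solution_alt answers
instance (answers : List Int) (out : List Int) : Decidable (Spec_solution answers out) := by unfold Spec_solution; infer_instance

-- ===== CLAIM (what is proved, stated in full; the proofs are below) =====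
def Claim_equal_solution : Prop := ∀ (answers : List Int), Dom_solution answers → Spec_solution answers (solution answers)

-- ===== LEMMAS AND PROOFS =====

-- 0/1 mark for one question: pattern p (of length m) vs answers at index i
def pvF (p : List Int) (m : Int) (answers : List Int) (i : Int) : Int :=
  if PySem.List.pyGetD p (PySem.Int.mod i m) 0 = PySem.List.pyGetD answers i 0 then 1 else 0

-- the key list B's histogram counts: (i mod 40, answers[i])
def pvL (answers : List Int) : List (Int × Int) :=
  (PySem.List.enumerate answers 0).map (fun ia => (PySem.Int.mod ia.1 40, ia.2))

-- B's per-element map-sum over enumerate, re-indexed as a sum over List.range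
theorem pv_enum_sum (h : Int → Int → Int) (zs : List Int) : ∀ (s : Int),
    ((PySem.List.enumerate zs s).map (fun ia => h ia.1 ia.2)).sum
      = ((List.range zs.length).map (fun (k : Nat) => h (s + (k : Int)) (zs.getD k 0))).sum := by
  induction zs with
  | nil => intro s; simp [PySem.List.enumerate_nil]
  | cons x t ih =>
      intro s
      rw [PySem.List.enumerate_cons]
      simp only [List.map_cons, List.sum_cons, List.length_cons,
        List.range_succ_eq_map, List.map_map, ih (s + 1)]
      congr 1
      · simp
      · apply congrArg
        apply List.map_congr_left
        intro k _
        simp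
        ring_nf

-- A's range loop over answers, re-indexed as a sum over List.range
theorem pv_range_sum (f : Int → Int) (n : Nat) :
    ((PySem.List.pyRange 0 (n : Int) 1).map f).sum
      = ((List.range n).map (fun (k : Nat) => f (k : Int))).sum := by
  rw [PySem.List.pyRange_one]
  simp only [Int.sub_zero, Int.toNat_natCast, List.map_map]
  apply congrArg
  apply List.map_congr_left
  intro k _
  simp

-- the fused fold over a triple splits into three independent sums
theorem pv_foldl_triple (f g h : Int → Int) (L : List Int) : ∀ (a b c : Int),
    L.foldl (fun sc i => (sc.1 + f i, sc.2.1 + g i, sc.2.2 + h i)) (a, b, c)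
      = (a + (L.map f).sum, b + (L.map g).sum, c + (L.map h).sum) := by
  induction L with
  | nil => intro a b c; simp
  | cons x t ih => intro a b c; simp [List.foldl_cons, ih]; constructor <;> [skip; constructor] <;> ring

-- the winner-collection loop vs the filter/map comprehension, on a 3-element score list
theorem pv_winners (x y z m : Int) :
    (PySem.List.pyRange 0 ((3 : Nat) : Int) 1).foldl
        (fun answer i => if PySem.List.pyGetD [x, y, z] i 0 = m then answer ++ [i + 1] else answer) []
      = ((PySem.List.enumerate [x, y, z] 0).filter (fun ks => ks.2 = m)).map (fun ks => ks.1 + 1) := by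
  have h3 : PySem.List.pyRange 0 ((3 : Nat) : Int) 1 = [0, 1, 2] := by decide
  rw [h3]
  simp only [List.foldl_cons, List.foldl_nil,
    PySem.List.enumerate_cons, PySem.List.enumerate_nil, List.filter]
  norm_num [PySem.List.pyGetD, PySem.List.pyGet?, PySem.List.pyIdx?]
  split_ifs <;> simp_all

-- B's histogram-building fold IS the counter of the key list pvL
theorem pv_counts (answers : List Int) :
    (PySem.List.enumerate answers 0).foldl
        (fun d ia =>
          let key : Int × Int := (PySem.Int.mod ia.1 40, ia.2)
          d.insert key (d.getD key 0 + 1)) PySem.Dict.empty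
      = PySem.Dict.counter (pvL answers) := by
  rw [pvL, ← PySem.Dict.foldl_insert_getD_add_one_eq_counter, List.foldl_map]

-- sum over range n of the indicator of one index k
theorem pv_range_ind_sum (n k : Nat) (c : Int) (h : k < n) :
    ((List.range n).map (fun j => if j = k then c else 0)).sum = c := by
  have : ((List.range n).map (fun j => if j = k then c else 0)).sum
      = ∑ j ∈ Finset.range n, if j = k then c else 0 := rfl
  rw [this]
  simp [Finset.sum_ite_eq', Finset.mem_range, h]

-- one key (j, f j), summed over j < 40, hits an element x with 0 ≤ x.1 < 40 exactly
-- when x.2 = f x.1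
theorem pv_single (f : Int → Int) (x : Int × Int) (h0 : 0 ≤ x.1) (h40 : x.1 < 40) :
    ((List.range 40).map (fun (k : Nat) => if x = ((k : Int), f (k : Int)) then (1 : Int) else 0)).sum
      = if f x.1 = x.2 then (1 : Int) else 0 := by
  have hk : ((x.1.toNat : Nat) : Int) = x.1 := Int.toNat_of_nonneg h0
  have hklt : x.1.toNat < 40 := by omega
  rw [List.map_congr_left
      (f := fun (k : Nat) => if x = ((k : Int), f (k : Int)) then (1 : Int) else 0)
      (g := fun (j : Nat) => if j = x.1.toNat then (if f x.1 = x.2 then (1 : Int) else 0) else 0)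
      (fun j _ => by
        dsimp only
        by_cases hjk : j = x.1.toNat
        · subst hjk
          rw [hk]
          rw [if_pos rfl]
          simp [Prod.ext_iff, eq_comm]
        · have hne : ¬ x = ((j : Int), f (j : Int)) := by
            intro he
            apply hjk
            have h1 : x.1 = (j : Int) := by rw [he]
            omega
          rw [if_neg hne, if_neg hjk])]
  exact pv_range_ind_sum 40 x.1.toNat _ hklt

-- summing the histogram's 40 lookups equals the per-element 0/1 sum
theorem pv_sum_count (f : Int → Int) (xs : List (Int × Int))
    (hx : ∀ x ∈ xs, 0 ≤ x.1 ∧ x.1 < 40) :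
    ((List.range 40).map (fun (k : Nat) => ((xs.count ((k : Int), f (k : Int)) : Nat) : Int))).sum
      = (xs.map (fun x => if f x.1 = x.2 then (1 : Int) else 0)).sum := by
  induction xs with
  | nil => simp
  | cons x t ih =>
      have hx0 := hx x (by simp)
      simp only [List.count_cons, List.map_cons, List.sum_cons, beq_iff_eq]
      push_cast
      rw [PySem.List.sum_map_add_int (List.range 40)
            (fun (k : Nat) => ((t.count ((k : Int), f (k : Int)) : Nat) : Int))
            (fun (k : Nat) => if x = ((k : Int), f (k : Int)) then (1 : Int) else 0),
          ih (fun y hy => hx y (by simp [hy]))]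
      rw [pv_single f x hx0.1 hx0.2]
      ring

-- B's 40-lookup score for one pattern equals A's per-question sum over range(len(answers))
theorem pv_bscore (answers : List Int) (p : List Int) (hm : 0 < p.length)
    (hd : ((p.length : Nat) : Int) ∣ 40) :
    ((PySem.List.pyRange 0 40 1).map
        (fun j => (PySem.Dict.counter (pvL answers)).getD
          (j, PySem.List.pyGetD p (PySem.Int.mod j (p.length : Int)) 0) 0)).sum
      = ((PySem.List.pyRange 0 (answers.length : Int) 1).map
          (pvF p (p.length : Int) answers)).sum := by
  have h40 : PySem.List.pyRange 0 40 1 = (List.range 40).map (fun (k : Nat) => (k : Int)) := by decide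
  have hmz : (0 : Int) < (p.length : Int) := by exact_mod_cast hm
  rw [h40, List.map_map]
  simp only [Function.comp_def, PySem.Dict.getD_counter]
  rw [pv_sum_count (fun j => PySem.List.pyGetD p (PySem.Int.mod j (p.length : Int)) 0)
      (pvL answers)
      (fun x hxm => by
        rw [pvL] at hxm
        obtain ⟨ia, _, rfl⟩ := List.mem_map.mp hxm
        exact ⟨PySem.Int.mod_nonneg ia.1 (by norm_num),
               PySem.Int.mod_lt ia.1 (by norm_num)⟩)]
  rw [pvL, List.map_map]
  simp only [Function.comp_def]
  have hmodmod : ∀ i : Int,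
      PySem.Int.mod (PySem.Int.mod i 40) (p.length : Int) = PySem.Int.mod i (p.length : Int) := by
    intro i
    rw [PySem.Int.mod_eq_emod_of_pos (a := i) (by norm_num : (0:Int) < 40),
        PySem.Int.mod_eq_emod_of_pos (b := (p.length : Int)) hmz,
        PySem.Int.mod_eq_emod_of_pos (a := i) hmz]
    exact Int.emod_emod_of_dvd i hd
  simp only [hmodmod]
  rw [pv_enum_sum (fun i a =>
        if PySem.List.pyGetD p (PySem.Int.mod i (p.length : Int)) 0 = a then (1 : Int) else 0)
      answers 0,
      pv_range_sum (pvF p (p.length : Int) answers) answers.length]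
  apply congrArg
  apply List.map_congr_left
  intro k _
  unfold pvF
  simp

-- ===== VERDICT (by name: the statement is the Claim_ definition above) =====
theorem solution_spec : Claim_equal_solution := by
  intro answers _
  unfold Spec_solution
  show solution answers = solution_alt answers
  simp only [solution, solution_alt, List.map_cons, List.map_nil]
  rw [show (fun (sc : Int × Int × Int) (i : Int) =>
        let c0 := if PySem.List.pyGetD [1, 2, 3, 4, 5] (PySem.Int.mod i 5) 0
                      = PySem.List.pyGetD answers i 0 then sc.1 + 1 else sc.1
        let c1 := if PySem.List.pyGetD [2, 1, 2, 3, 2, 4, 2, 5] (PySem.Int.mod i 8) 0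
                      = PySem.List.pyGetD answers i 0 then sc.2.1 + 1 else sc.2.1
        let c2 := if PySem.List.pyGetD [3, 3, 1, 1, 2, 2, 4, 4, 5, 5] (PySem.Int.mod i 10) 0
                      = PySem.List.pyGetD answers i 0 then sc.2.2 + 1 else sc.2.2
        (c0, c1, c2))
      = (fun sc i => (sc.1 + pvF [1, 2, 3, 4, 5] 5 answers i,
                      sc.2.1 + pvF [2, 1, 2, 3, 2, 4, 2, 5] 8 answers i,
                      sc.2.2 + pvF [3, 3, 1, 1, 2, 2, 4, 4, 5, 5] 10 answers i)) from by
        funext sc i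
        unfold pvF
        dsimp only
        split_ifs <;> simp]
  rw [pv_foldl_triple]
  rw [pv_counts answers]
  have b1 := pv_bscore answers [1, 2, 3, 4, 5] (by norm_num) (by norm_num)
  have b2 := pv_bscore answers [2, 1, 2, 3, 2, 4, 2, 5] (by norm_num) (by norm_num)
  have b3 := pv_bscore answers [3, 3, 1, 1, 2, 2, 4, 4, 5, 5] (by norm_num) (by norm_num)
  simp only [b1, b2, b3]
  have := pv_winners
    (((PySem.List.pyRange 0 (answers.length : Int) 1).map (pvF [1, 2, 3, 4, 5] 5 answers)).sum)
    (((PySem.List.pyRange 0 (answers.length : Int) 1).map (pvF [2, 1, 2, 3, 2, 4, 2, 5] 8 answers)).sum)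
    (((PySem.List.pyRange 0 (answers.length : Int) 1).map (pvF [3, 3, 1, 1, 2, 2, 4, 4, 5, 5] 10 answers)).sum)
    ((PySem.List.max?
      [(((PySem.List.pyRange 0 (answers.length : Int) 1).map (pvF [1, 2, 3, 4, 5] 5 answers)).sum),
       (((PySem.List.pyRange 0 (answers.length : Int) 1).map (pvF [2, 1, 2, 3, 2, 4, 2, 5] 8 answers)).sum),
       (((PySem.List.pyRange 0 (answers.length : Int) 1).map (pvF [3, 3, 1, 1, 2, 2, 4, 4, 5, 5] 10 answers)).sum)]
      (fun y => y)).getD 0)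
  simpa using this
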